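-- pv_equiv track=rewrite | github.com/bytedance/QSync | qsync/Predictor/fastest_plan.py | generate_all_possible_cases
-- ===== SOURCE A (Python) =====
-- def generate_all_possible_cases(L, ava_bits):
--     poss_com_l = len(ava_bits)
--     values = [[i] for i in range(poss_com_l)]
--     def gen_recursive(values, L, poss_com_l):
--         new_values = []
--         while len(values) != 0:
--             value = values.pop()
--             for i in range(poss_com_l):
--                 new_value = value + [i]
--                 new_values.append(new_value)
--         [values.append(new_value) for new_value in new_values]
--         if L - 1 != 0:
--             gen_recursive(values, L-1, poss_com_l)
--     if L != 1:
--         gen_recursive(values, L-1, poss_com_l)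
--
--     return values
-- ===== SOURCE B (Python) =====
-- def generate_all_possible_cases(L, ava_bits):
--     n = len(ava_bits)
--     values = [[i] for i in range(n)]
--     for _ in range(L - 1):
--         values = [e + [i] for e in reversed(values) for i in range(n)]
--     return values
-- ===== Notes on version B (the rewrite author's own statement) =====
-- stated objective: simpler
-- what changed: Replaces the recursive helper that destructively pops from a mutable list and re-appends with a plain iterative loop building each level by one comprehension over the reversed previous level (pop-from-end order preserved).
import Mathlib
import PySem

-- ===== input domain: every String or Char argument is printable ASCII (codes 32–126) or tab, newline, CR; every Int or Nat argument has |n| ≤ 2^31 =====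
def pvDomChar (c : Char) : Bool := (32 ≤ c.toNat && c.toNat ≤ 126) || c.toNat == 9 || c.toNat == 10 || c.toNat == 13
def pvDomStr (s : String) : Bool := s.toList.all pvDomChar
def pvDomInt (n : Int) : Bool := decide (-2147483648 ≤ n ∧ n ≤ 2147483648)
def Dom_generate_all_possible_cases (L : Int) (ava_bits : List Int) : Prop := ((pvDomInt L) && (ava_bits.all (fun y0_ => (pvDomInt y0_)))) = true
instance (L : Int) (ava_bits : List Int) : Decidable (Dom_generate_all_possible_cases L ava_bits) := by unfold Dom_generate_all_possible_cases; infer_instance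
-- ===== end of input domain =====

-- B replaces A's recursive helper mutating a popped-from list with a plain iterative
-- per-level comprehension loop (simpler); A raises RecursionError for L <= 0 (excluded by Pre_, B returns the base list there).


-- ===== PORT A =====
-- gen_recursive: the while loop pops from the END of `values`, so it walks
-- `values.reverse`, extending `new_values` with value+[i] for each i.
-- Python recurses (and diverges) when L-1 < 0; the `0 < L - 1` guard only makes the
-- Lean function total there (those inputs are outside Pre_).
def genRecA (values : List (List Int)) (L : Int) (n : Int) : List (List Int) :=
  let new_values :=
    values.reverse.foldl
      (fun acc value =>
        acc ++ (PySem.List.pyRange 0 n 1).map (fun i => value ++ [i])) []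
  if 0 < L - 1 then genRecA new_values (L - 1) n else new_values
termination_by L.toNat
decreasing_by omega

def generate_all_possible_cases (L : Int) (ava_bits : List Int) : List (List Int) :=
  let poss_com_l : Int := ava_bits.length
  let values := (PySem.List.pyRange 0 poss_com_l 1).map (fun i => [i])
  if L ≠ 1 then genRecA values (L - 1) poss_com_l else values

-- ===== PORT B =====
def generate_all_possible_cases_alt (L : Int) (ava_bits : List Int) : List (List Int) :=
  let n : Int := ava_bits.length
  let base := (PySem.List.pyRange 0 n 1).map (fun i => [i])
  (List.range (L - 1).toNat).foldl
    (fun values _ =>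
      values.reverse.flatMap (fun e => (PySem.List.pyRange 0 n 1).map (fun i => e ++ [i])))
    base

-- ===== PRECONDITION & SPEC =====
-- Pre_ excludes exactly L ≤ 0: there A's gen_recursive recurses without bound and raises RecursionError (no value is returned).
def Pre_generate_all_possible_cases (L : Int) (ava_bits : List Int) : Prop := 1 ≤ L
instance (L : Int) (ava_bits : List Int) : Decidable (Pre_generate_all_possible_cases L ava_bits) := by
  unfold Pre_generate_all_possible_cases; infer_instance
def pvWitness_generate_all_possible_cases : Int × List Int := (2, [4, 8])

def Spec_generate_all_possible_cases (L : Int) (ava_bits : List Int) (out : List (List Int)) : Prop := out = generate_all_possible_cases_alt L ava_bits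
instance (L : Int) (ava_bits : List Int) (out : List (List Int)) : Decidable (Spec_generate_all_possible_cases L ava_bits out) := by unfold Spec_generate_all_possible_cases; infer_instance

-- ===== CLAIM (what is proved, stated in full; the proofs are below) =====
def Claim_equal_generate_all_possible_cases : Prop := ∀ (L : Int) (ava_bits : List Int), Dom_generate_all_possible_cases L ava_bits → Pre_generate_all_possible_cases L ava_bits → Spec_generate_all_possible_cases L ava_bits (generate_all_possible_cases L ava_bits)

-- ===== LEMMAS AND PROOFS =====

-- one level of extension in B's comprehension form
def stepB (n : Int) (values : List (List Int)) : List (List Int) :=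
  values.reverse.flatMap (fun e => (PySem.List.pyRange 0 n 1).map (fun i => e ++ [i]))

lemma foldl_range_iterate (g : List (List Int) → List (List Int)) :
    ∀ (m : Nat) (v : List (List Int)),
      (List.range m).foldl (fun values _ => g values) v = g^[m] v := by
  intro m
  induction m with
  | zero => intro v; simp
  | succ m ih =>
      intro v
      rw [List.range_succ, List.foldl_append, ih, Function.iterate_succ_apply']
      simp

lemma genRecA_iter (n : Int) :
    ∀ (m : Nat) (L : Int), L.toNat = m → 1 ≤ L → ∀ (v : List (List Int)),
      genRecA v L n = (stepB n)^[m] v := by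
  intro m
  induction m with
  | zero => intro L hm hL v; omega
  | succ m ih =>
      intro L hm hL v
      rw [genRecA]
      simp only [PySem.List.foldl_append_eq_flatMap, List.nil_append]
      by_cases h : 0 < L - 1
      · rw [if_pos h, ih (L - 1) (by omega) (by omega),
          Function.iterate_succ_apply]
        rfl
      · rw [if_neg h]
        have : m = 0 := by omega
        subst this
        rfl

theorem generate_all_possible_cases_spec : Claim_equal_generate_all_possible_cases := by
  intro L ava_bits _ hPre
  unfold Spec_generate_all_possible_cases generate_all_possible_cases generate_all_possible_cases_alt
  by_cases h1 : L = 1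
  · subst h1; simp
  · have hL : 1 ≤ L := hPre
    rw [if_pos h1,
      genRecA_iter (ava_bits.length : Int) (L - 1).toNat (L - 1) rfl (by omega),
      foldl_range_iterate]
    rfl
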